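-- pv_equiv track=rewrite | github.com/EvanMu96/Cipherinpython | Frequency_Finder/Frequency_Finder.py | get_frequency_order
-- ===== SOURCE A (Python) =====
-- ETAOIN = 'ETAOINSHRDLCUMWFGYPBVKJXQZ'
--
-- LETTERS = 'ABCDEFGHIJKLMNOPQRSTUVWXYZ'
--
-- def get_letter_count(message):
--     # Returns a dictionary with keys of single letters and values of the
--     # count of how many times they appear in the message parameter
--     letter_count = {'A': 0, 'B': 0, 'C': 0, 'D': 0, 'E': 0, 'F': 0, 'G': 0, 'H': 0, 'I': 0, 'J': 0, 'K': 0, 'L': 0,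
--                    'M': 0, 'N': 0, 'O': 0, 'P': 0, 'Q': 0, 'R': 0, 'S': 0, 'T': 0, 'U': 0, 'V': 0, 'W': 0, 'X': 0,
--                    'Y': 0, 'Z': 0}
--     for letter in message.upper():
--         if letter in LETTERS:
--             letter_count[letter] += 1
--
--     return letter_count
--
-- def get_item_at_index_zero(x):
--     return x[0]
--
-- def get_frequency_order(message):
--     # Returns a string of the alphabet letters arranged in order of most
--     # frequency occurring in the message parameter
--     letter_to_freq = get_letter_count(message)
--
--     freq_to_letter = {}
--     for letter in LETTERS:
--         if letter_to_freq[letter] not in freq_to_letter: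
--             freq_to_letter[letter_to_freq[letter]] = [letter]
--         else:
--             freq_to_letter[letter_to_freq[letter]].append(letter)
--
--     for freq in freq_to_letter:
--         freq_to_letter[freq].sort(key=ETAOIN.find, reverse=True)
--         freq_to_letter[freq] = ''.join(freq_to_letter[freq])
--
--     freq_pairs = list(freq_to_letter.items())
--     freq_pairs.sort(key=get_item_at_index_zero, reverse=True)
--
--     freq_order = []
--     for freq_pair in freq_pairs:
--         freq_order.append(freq_pair[1])
--
--     return ''.join(freq_order)
-- ===== SOURCE B (Python) =====
-- ETAOIN = 'ETAOINSHRDLCUMWFGYPBVKJXQZ'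
--
-- LETTERS = 'ABCDEFGHIJKLMNOPQRSTUVWXYZ'
--
-- def get_frequency_order(message):
--     # One pass to count the letters, then a single sort of the alphabet.
--     # Each letter's rank in ETAOIN is a unique value in range(26), so the
--     # integer 26*count + rank orders letters by (count, ETAOIN rank)
--     # lexicographically; reverse=True reproduces A's exact tie-breaking.
--     count = dict.fromkeys(LETTERS, 0)
--     for ch in message.upper():
--         if ch in count:
--             count[ch] += 1
--     return ''.join(sorted(LETTERS, key=lambda l: 26 * count[l] + ETAOIN.find(l), reverse=True))
-- ===== Notes on version B (the rewrite author's own statement) =====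
-- stated objective: simpler
-- what changed: A's inverse freq->letters bucket dict, per-bucket ETAOIN sort, bucket sort and concatenation are replaced by one reverse sort of the alphabet under the injective combined key 26*count + ETAOIN rank, which orders letters by (count, ETAOIN rank) lexicographically.
import Mathlib
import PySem

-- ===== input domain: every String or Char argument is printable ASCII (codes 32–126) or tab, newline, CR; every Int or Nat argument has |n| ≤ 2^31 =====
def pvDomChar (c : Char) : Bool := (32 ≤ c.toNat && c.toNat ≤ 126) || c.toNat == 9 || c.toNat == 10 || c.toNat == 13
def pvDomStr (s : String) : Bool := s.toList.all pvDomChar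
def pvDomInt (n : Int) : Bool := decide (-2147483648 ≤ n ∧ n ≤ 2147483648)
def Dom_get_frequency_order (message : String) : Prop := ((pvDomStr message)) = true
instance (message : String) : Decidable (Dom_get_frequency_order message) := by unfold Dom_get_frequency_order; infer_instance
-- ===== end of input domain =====

-- B replaces A's freq→letters bucket dict, per-bucket sort and bucket sort by ONE sort of the
-- alphabet under the injective combined key 26*count+ETAOIN-rank (objective: simpler).

def pvETAOIN : String := "ETAOINSHRDLCUMWFGYPBVKJXQZ"

def pvLETTERS : String := "ABCDEFGHIJKLMNOPQRSTUVWXYZ"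

-- ===== PORT A =====
def get_letter_count (message : String) : PySem.Dict Char Int :=
  let letter_count : PySem.Dict Char Int := PySem.Dict.mk
    [('A',0),('B',0),('C',0),('D',0),('E',0),('F',0),('G',0),('H',0),('I',0),('J',0),('K',0),('L',0),
     ('M',0),('N',0),('O',0),('P',0),('Q',0),('R',0),('S',0),('T',0),('U',0),('V',0),('W',0),('X',0),
     ('Y',0),('Z',0)]
  -- 'letter_count[letter] += 1': the guard guarantees the key is present, so getD's default is never read
  (PySem.Chars.upper message.toList).foldl
    (fun d letter => if PySem.Chars.isIn [letter] pvLETTERS.toList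
                     then d.insert letter (d.getD letter 0 + 1) else d)
    letter_count

def get_item_at_index_zero (x : Int × List Char) : Int := x.1

def get_frequency_order (message : String) : String :=
  let letter_to_freq := get_letter_count message
  -- 'letter_to_freq[letter]' always finds its key (every letter of LETTERS is in the dict): getD 0
  let freq_to_letter : PySem.Dict Int (List Char) :=
    pvLETTERS.toList.foldl (fun d letter =>
      if ¬ d.contains (letter_to_freq.getD letter 0) then
        d.insert (letter_to_freq.getD letter 0) [letter]
      else
        d.insert (letter_to_freq.getD letter 0) (d.getD (letter_to_freq.getD letter 0) [] ++ [letter]))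
      PySem.Dict.empty
  -- the in-place loop 'for freq in freq_to_letter: sort; join' rewrites every value in place;
  -- Python strings are carried as List Char, so the per-bucket ''.join stays a char list and the
  -- final ''.join is the flatten of the collected buckets
  let freq_to_letter : PySem.Dict Int (List Char) := PySem.Dict.mk
    (freq_to_letter.items.map (fun p =>
      (p.1, PySem.List.sorted p.2 (fun l => PySem.Chars.find pvETAOIN.toList [l]) true)))
  let freq_pairs := PySem.List.sorted freq_to_letter.items get_item_at_index_zero true
  let freq_order := freq_pairs.foldl (fun acc p => acc ++ [p.2]) ([] : List (List Char))
  String.mk freq_order.flatten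

-- ===== PORT B =====
def get_frequency_order_alt (message : String) : String :=
  let count0 : PySem.Dict Char Int :=
    pvLETTERS.toList.foldl (fun d l => d.insert l 0) PySem.Dict.empty   -- dict.fromkeys(LETTERS, 0)
  let count := (PySem.Chars.upper message.toList).foldl
    (fun d ch => if d.contains ch then d.insert ch (d.getD ch 0 + 1) else d) count0
  String.mk (PySem.List.sorted pvLETTERS.toList
    (fun l => 26 * count.getD l 0 + PySem.Chars.find pvETAOIN.toList [l]) true)

-- ===== PRECONDITION & SPEC =====
def Spec_get_frequency_order (message : String) (out : String) : Prop := out = get_frequency_order_alt message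
instance (message : String) (out : String) : Decidable (Spec_get_frequency_order message out) := by unfold Spec_get_frequency_order; infer_instance

-- ===== CLAIM (what is proved, stated in full; the proofs are below) =====
def Claim_equal_get_frequency_order : Prop := ∀ (message : String), Dom_get_frequency_order message → Spec_get_frequency_order message (get_frequency_order message)

-- ===== LEMMAS AND PROOFS =====

-- the 26 letters are distinct
lemma pv_letters_nodup : pvLETTERS.toList.Nodup := by decide

-- the table of ETAOIN ranks of the 26 letters
set_option maxRecDepth 4000 in
lemma pv_find_table : pvLETTERS.toList.map (fun l => PySem.Chars.find pvETAOIN.toList [l])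
    = [2,19,11,9,0,15,16,7,4,22,21,10,13,5,3,18,24,8,6,1,12,20,14,23,17,25] := by decide

-- every letter's ETAOIN rank lies in [0, 26)
lemma pv_e_bounds : ∀ l ∈ pvLETTERS.toList,
    0 ≤ PySem.Chars.find pvETAOIN.toList [l] ∧ PySem.Chars.find pvETAOIN.toList [l] < 26 := by
  intro l hl
  have hm : PySem.Chars.find pvETAOIN.toList [l]
      ∈ pvLETTERS.toList.map (fun l => PySem.Chars.find pvETAOIN.toList [l]) :=
    List.mem_map_of_mem hl
  rw [pv_find_table] at hm
  have h2 : ∀ x ∈ ([2,19,11,9,0,15,16,7,4,22,21,10,13,5,3,18,24,8,6,1,12,20,14,23,17,25] : List Int),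
      0 ≤ x ∧ x < 26 := by decide
  exact h2 _ hm

-- the ETAOIN rank is injective on the 26 letters
lemma pv_e_inj : ∀ a ∈ pvLETTERS.toList, ∀ b ∈ pvLETTERS.toList,
    PySem.Chars.find pvETAOIN.toList [a] = PySem.Chars.find pvETAOIN.toList [b] → a = b := by
  have hn : (pvLETTERS.toList.map (fun l => PySem.Chars.find pvETAOIN.toList [l])).Nodup := by
    rw [pv_find_table]; decide
  have h := List.inj_on_of_nodup_map hn
  exact fun a ha b hb => h ha hb

-- B's dict.fromkeys fold builds exactly A's literal zero dict
lemma pv_init_eq :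
    pvLETTERS.toList.foldl (fun d l => d.insert l (0:Int)) PySem.Dict.empty
      = PySem.Dict.mk
    [('A',0),('B',0),('C',0),('D',0),('E',0),('F',0),('G',0),('H',0),('I',0),('J',0),('K',0),('L',0),
     ('M',0),('N',0),('O',0),('P',0),('Q',0),('R',0),('S',0),('T',0),('U',0),('V',0),('W',0),('X',0),
     ('Y',0),('Z',0)] := by decide

-- A's membership guard ('letter in LETTERS') and B's ('ch in count') coincide while the
-- dict's keys are the 26 letters, and both loops preserve those keys
lemma pv_isIn_singleton (ch : Char) (L : List Char) : PySem.Chars.isIn [ch] L = decide (ch ∈ L) := by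
  by_cases hm : ch ∈ L
  · simp only [hm, decide_true]
    exact (PySem.Chars.isIn_iff_infix _ _).mpr ((List.singleton_infix_iff ch L).mpr hm)
  · have h : ¬ PySem.Chars.isIn [ch] L = true := by
      rw [PySem.Chars.isIn_iff_infix, List.singleton_infix_iff]; exact hm
    simp only [hm, decide_false]
    exact Bool.not_eq_true _ |>.mp h

lemma pv_count_loop_eq (u : List Char) :
    ∀ (d : PySem.Dict Char Int), d.keys = pvLETTERS.toList →
    u.foldl (fun d letter => if PySem.Chars.isIn [letter] pvLETTERS.toList
                             then d.insert letter (d.getD letter 0 + 1) else d) d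
      = u.foldl (fun d ch => if d.contains ch then d.insert ch (d.getD ch 0 + 1) else d) d := by
  induction u with
  | nil => intro d _; rfl
  | cons ch u ih =>
    intro d h
    have hc : d.contains ch = PySem.Chars.isIn [ch] pvLETTERS.toList := by
      rw [PySem.Dict.contains_eq_decide_mem_keys, h, pv_isIn_singleton]
    simp only [List.foldl_cons, hc]
    by_cases hm : PySem.Chars.isIn [ch] pvLETTERS.toList = true
    · simp only [hm, if_true]
      exact ih _ (by rw [PySem.Dict.keys_insert_of_contains _ _ (hc.trans hm), h])
    · simp only [Bool.not_eq_true] at hm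
      simp only [hm, Bool.false_eq_true, if_false]
      exact ih _ h

-- a nodup family of buckets 'letters with g-value c' flattens to a permutation of the filter by membership
lemma pv_flatten_filter_perm (g : Char → Int) (L : List Char) :
    ∀ fs : List Int, fs.Nodup →
    (fs.map (fun c => L.filter (fun l => g l == c))).flatten.Perm
      (L.filter (fun l => decide (g l ∈ fs))) := by
  intro fs
  induction fs with
  | nil => simp
  | cons c fs ih =>
    intro hnd
    rcases List.nodup_cons.mp hnd with ⟨hc, hnd'⟩
    simp only [List.map_cons, List.flatten_cons]
    have h1 : ((fs.map (fun c => L.filter (fun l => g l == c))).flatten).Perm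
        (L.filter (fun l => decide (g l ∈ fs))) := ih hnd'
    refine ((h1.append_left _)).trans ?_
    have h2 := List.filter_append_perm (fun l => g l == c) (L.filter (fun l => decide (g l ∈ c :: fs)))
    rw [List.filter_filter, List.filter_filter] at h2
    have e1 : ∀ x, ((g x == c) && decide (g x ∈ c :: fs)) = (g x == c) := by
      intro x; by_cases hx : g x = c <;> simp [hx]
    have e2 : ∀ x, ((!(g x == c)) && decide (g x ∈ c :: fs)) = decide (g x ∈ fs) := by
      intro x; by_cases hx : g x = c
      · simp [hx]; intro h; exact absurd h hc
      · simp [hx]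
    rw [List.filter_congr (fun x _ => e1 x), List.filter_congr (fun x _ => e2 x)] at h2
    exact h2

-- A's whole arrangement pipeline, for an arbitrary count function g, is the single reverse sort
-- of the alphabet under the combined key 26*g + ETAOIN-rank
lemma pv_arrange_eq (g : Char → Int) :
    ((PySem.List.sorted
        ((pvLETTERS.toList.foldl (fun d letter =>
            if ¬ d.contains (g letter) then d.insert (g letter) [letter]
            else d.insert (g letter) (d.getD (g letter) [] ++ [letter])) PySem.Dict.empty).items.map
          (fun p => (p.1, PySem.List.sorted p.2 (fun l => PySem.Chars.find pvETAOIN.toList [l]) true)))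
        get_item_at_index_zero true).foldl (fun acc p => acc ++ [p.2]) ([] : List (List Char))).flatten
      = PySem.List.sorted pvLETTERS.toList
          (fun l => 26 * g l + PySem.Chars.find pvETAOIN.toList [l]) true := by
  -- abbreviations
  set Lc := pvLETTERS.toList with hLc
  set e : Char → Int := fun l => PySem.Chars.find pvETAOIN.toList [l] with he
  set k : Char → Int := fun l => 26 * g l + e l with hk
  set fs : List Int := PySem.Set.ofList (Lc.map g) with hfs
  set fs' : List Int := PySem.List.sorted fs (fun x => x) true with hfs'
  set SB : Int → List Char := fun c => PySem.List.sorted (Lc.filter (fun l => g l == c)) e true with hSB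
  -- Step 1: the branch on 'contains' is exactly Dict.modify
  have h1 : Lc.foldl (fun d letter =>
        if ¬ d.contains (g letter) then d.insert (g letter) [letter]
        else d.insert (g letter) (d.getD (g letter) [] ++ [letter])) PySem.Dict.empty
      = Lc.foldl (fun d letter => d.modify (g letter) [] (fun v => v ++ [letter])) PySem.Dict.empty := by
    refine PySem.List.foldl_congr_mem _ _ _ _ ?_
    intro d l _
    by_cases hc : d.contains (g l) = true
    · simp [hc, PySem.Dict.modify]
    · simp only [Bool.not_eq_true] at hc
      simp [hc, PySem.Dict.modify, PySem.Dict.getD_of_not_contains _ _ hc]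
  set D : PySem.Dict Int (List Char) :=
    Lc.foldl (fun d letter => d.modify (g letter) [] (fun v => v ++ [letter])) PySem.Dict.empty with hD
  rw [h1]
  -- keys, nodup, lookups of D
  have hkeys : D.keys = fs := by
    rw [hD, PySem.Dict.keys_foldl_modify_key Lc g [] (fun d x => (fun v => v ++ [x])) PySem.Dict.empty]
    simp [PySem.Set.update_nil_left, hfs]
  have hnd : D.keys.Nodup := by rw [hkeys]; exact PySem.Set.nodup_ofList _
  have hgetD : ∀ c, D.getD c [] = Lc.filter (fun l => g l == c) := by
    intro c
    have h := PySem.Dict.getD_foldl_modify_append (Lc.map (fun l => ((g l, l) : Int × Char)))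
      PySem.Dict.empty c
    rw [List.foldl_map] at h
    rw [hD, h]
    simp [List.filter_map, Function.comp_def]
  have hitems : D.items.map
      (fun p => (p.1, PySem.List.sorted p.2 e true)) = fs.map (fun c => (c, SB c)) := by
    rw [PySem.Dict.items_eq_map_keys D hnd [], hkeys, List.map_map]
    refine List.map_congr_left ?_
    intro c _
    simp [hgetD c, hSB]
  rw [hitems]
  -- facts about fs'
  have hfsnd : fs.Nodup := PySem.Set.nodup_ofList _
  have hfs'perm : fs'.Perm fs := PySem.List.sorted_perm _ _ _
  have hfs'nd : fs'.Nodup := hfs'perm.symm.nodup hfsnd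
  have hfs'gt : fs'.Pairwise (fun a b => b < a) := by
    have hle := PySem.List.sorted_pairwise_rev fs (fun x : Int => x)
    rw [← hfs'] at hle
    exact (hle.and hfs'nd).imp (fun h => lt_of_le_of_ne h.1 (Ne.symm h.2))
  have hmemfs' : ∀ c, c ∈ fs' ↔ c ∈ fs := fun c => hfs'perm.mem_iff
  -- Step 4: the reverse sort of the items by first component
  have h4 : PySem.List.sorted (fs.map (fun c => (c, SB c))) get_item_at_index_zero true
      = fs'.map (fun c => (c, SB c)) := by
    refine PySem.List.sorted_rev_eq_of_perm_of_pairwise_gt _ _ _ (hfs'perm.map _) ?_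
    rw [List.pairwise_map]
    exact hfs'gt.imp (fun h => h)
  rw [h4]
  -- Step 5: the append loop collects the buckets
  rw [PySem.List.foldl_append_singleton_eq_map (fun p : Int × List Char => p.2), List.nil_append,
    List.map_map]
  have h5 : ((fun p : Int × List Char => p.2) ∘ fun c => (c, SB c)) = SB := rfl
  rw [h5]
  -- membership in a bucket
  have hmemSB : ∀ c, ∀ x, x ∈ SB c ↔ (x ∈ Lc ∧ g x = c) := by
    intro c x
    rw [hSB, PySem.List.mem_sorted, List.mem_filter]
    simp
  -- Step 6: the flattened buckets are the reverse sort of the alphabet by the combined key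
  refine (PySem.List.sorted_rev_eq_of_perm_of_pairwise_gt _ _ _ ?_ ?_).symm
  · -- permutation
    have h6a : List.Forall₂ List.Perm (fs'.map SB) (fs'.map (fun c => Lc.filter (fun l => g l == c))) := by
      rw [List.forall₂_map_left_iff, List.forall₂_map_right_iff]
      refine List.forall₂_same.mpr ?_
      intro c _
      exact PySem.List.sorted_perm _ _ _
    refine (List.Perm.flatten_congr h6a).trans ?_
    refine (pv_flatten_filter_perm g Lc fs' hfs'nd).trans ?_
    have : ∀ l ∈ Lc, decide (g l ∈ fs') = true := by
      intro l hl
      simp only [decide_eq_true_eq, hmemfs', hfs, PySem.Set.mem_ofList]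
      exact List.mem_map_of_mem hl
    rw [List.filter_congr this, List.filter_true]
  · -- pairwise strictly decreasing combined key
    rw [List.pairwise_flatten]
    constructor
    · -- within a bucket
      intro b hb
      rw [List.mem_map] at hb
      obtain ⟨c, _, rfl⟩ := hb
      have hle : List.Pairwise (fun a b => e b ≤ e a) (SB c) :=
        PySem.List.sorted_pairwise_rev (Lc.filter (fun l => g l == c)) e
      have hbnd : (SB c).Nodup :=
        (PySem.List.sorted_perm _ _ _).symm.nodup (pv_letters_nodup.filter _)
      refine ((hle.and hbnd).imp_of_mem ?_)
      intro a b ha hb h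
      obtain ⟨haL, hga⟩ := (hmemSB c a).mp ha
      obtain ⟨hbL, hgb⟩ := (hmemSB c b).mp hb
      have hne : e a ≠ e b := fun hab => h.2 (pv_e_inj a haL b hbL hab)
      have : e b < e a := lt_of_le_of_ne h.1 (fun hab => hne hab.symm)
      simp only [hk]
      rw [hga, hgb]
      omega
    · -- between buckets
      rw [List.pairwise_map]
      refine hfs'gt.imp_of_mem ?_
      intro c1 c2 hc1 hc2 hlt x hx y hy
      obtain ⟨hxL, hgx⟩ := (hmemSB c1 x).mp hx
      obtain ⟨hyL, hgy⟩ := (hmemSB c2 y).mp hy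
      have hbx : 0 ≤ e x ∧ e x < 26 := pv_e_bounds x hxL
      have hby : 0 ≤ e y ∧ e y < 26 := pv_e_bounds y hyL
      simp only [hk]
      rw [hgx, hgy]
      omega

-- ===== VERDICT (by name: the statement is the Claim_ definition above) =====
set_option maxRecDepth 4000 in
theorem get_frequency_order_spec : Claim_equal_get_frequency_order := by
  intro message _
  show _ = _
  simp only [get_frequency_order, get_frequency_order_alt, get_letter_count, pv_init_eq]
  rw [pv_count_loop_eq _ _ (by decide)]
  rw [pv_arrange_eq (fun letter =>
    (List.foldl (fun d ch => if d.contains ch = true then d.insert ch (d.getD ch 0 + 1) else d)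
      (PySem.Dict.mk
        [('A',0),('B',0),('C',0),('D',0),('E',0),('F',0),('G',0),('H',0),('I',0),('J',0),('K',0),('L',0),
         ('M',0),('N',0),('O',0),('P',0),('Q',0),('R',0),('S',0),('T',0),('U',0),('V',0),('W',0),('X',0),
         ('Y',0),('Z',0)]) (PySem.Chars.upper message.toList)).getD letter 0)]
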